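-- pv_equiv track=rewrite | github.com/Josh-XT/AGiXT | agixt/extensions/github.py | _try_different_indentations
-- ===== SOURCE A (Python) =====
-- from typing import List, Literal, Union
--
-- def _try_different_indentations(
--     content: str, max_indent: int = 3
-- ) -> List[str]:
--     """Try different indentation levels for a given content block.
--
--     Args:
--         content: The code block to process
--         max_indent: Maximum number of indentation levels to try (default 3)
--
--     Returns:
--         List of content variations with different indentation levels
--     """
--     variations = []
--     lines = content.splitlines()
--
--     # Add original version
--     variations.append(content)
--
--     # Try different indentation levels
--     for indent_level in range(1, max_indent + 1):
--         indented_lines = []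
--         indent = "    " * indent_level  # 4 spaces per level
--
--         for line in lines:
--             if line.strip():  # Only indent non-empty lines
--                 indented_lines.append(indent + line)
--             else:
--                 indented_lines.append(line)
--
--         variations.append("\n".join(indented_lines))
--
--     return variations
-- ===== SOURCE B (Python) =====
-- def _try_different_indentations(content, max_indent=3):
--     """Generate content variations with different indentation levels.
--
--     Incremental: each level is derived from the PREVIOUS level's lines by
--     prefixing one more 4-space unit to the non-blank lines, so no level is
--     rebuilt from the original lines and no "    " * level string is formed.
--     """
--     variations = [content]
--     lines = content.splitlines()
--     for _ in range(max_indent):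
--         lines = [("    " + l) if l.strip() else l for l in lines]
--         variations.append("\n".join(lines))
--     return variations
-- ===== Notes on version B (the rewrite author's own statement) =====
-- stated objective: alternative
-- what changed: Replaces A's per-level recomputation from the original lines (with a ' '*level prefix) by an incremental algorithm: a single cumulative lines state is re-indented one 4-space unit per iteration, each variation being derived from the previous one.
import Mathlib
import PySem

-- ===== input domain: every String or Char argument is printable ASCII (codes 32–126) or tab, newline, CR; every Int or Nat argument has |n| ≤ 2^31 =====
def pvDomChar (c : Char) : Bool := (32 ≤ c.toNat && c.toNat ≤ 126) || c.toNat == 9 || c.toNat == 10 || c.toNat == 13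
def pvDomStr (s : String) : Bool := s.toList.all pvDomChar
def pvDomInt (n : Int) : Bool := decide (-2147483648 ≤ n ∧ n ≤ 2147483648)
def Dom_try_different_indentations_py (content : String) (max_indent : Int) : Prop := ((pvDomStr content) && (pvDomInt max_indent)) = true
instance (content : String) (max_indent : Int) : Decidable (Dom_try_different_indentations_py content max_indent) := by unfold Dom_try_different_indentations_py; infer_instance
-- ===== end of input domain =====

-- B is incremental: one cumulative lines state is re-indented by one 4-space unit per
-- iteration, each variation derived from the previous one; A rebuilds every level from
-- the original lines with a "    "*level prefix (objective: alternative, same cost).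

-- ===== PORT A =====
-- level-major: for each indent_level, rebuild the whole line list from the original lines
def try_different_indentations_py (content : String) (max_indent : Int) : List String :=
  let lines := PySem.Chars.splitlines content.toList
  let variations : List String := [content]
  (PySem.List.pyRange 1 (max_indent + 1) 1).foldl
    (fun vars indent_level =>
      let indent := PySem.List.pyRepeat "    ".toList indent_level
      let indented_lines := lines.foldl
        (fun acc line =>
          if PySem.Chars.strip line ≠ [] then acc ++ [indent ++ line]
          else acc ++ [line]) []
      vars ++ [String.ofList (PySem.Chars.join ['\n'] indented_lines)])
    variations

-- ===== PORT B =====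
-- incremental: the running `lines` are re-indented one unit each iteration
def try_different_indentations_py_alt (content : String) (max_indent : Int) : List String :=
  let st := (List.range max_indent.toNat).foldl
    (fun (st : List (List Char) × List String) _ =>
      let nxt := st.1.map (fun l => if PySem.Chars.strip l ≠ [] then "    ".toList ++ l else l)
      (nxt, st.2 ++ [String.ofList (PySem.Chars.join ['\n'] nxt)]))
    (PySem.Chars.splitlines content.toList, [content])
  st.2

-- ===== PRECONDITION & SPEC =====
def Spec_try_different_indentations_py (content : String) (max_indent : Int) (out : List String) : Prop := out = try_different_indentations_py_alt content max_indent
instance (content : String) (max_indent : Int) (out : List String) : Decidable (Spec_try_different_indentations_py content max_indent out) := by unfold Spec_try_different_indentations_py; infer_instance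

-- ===== CLAIM =====
def Claim_equal_try_different_indentations_py : Prop := ∀ (content : String) (max_indent : Int), Dom_try_different_indentations_py content max_indent → Spec_try_different_indentations_py content max_indent (try_different_indentations_py content max_indent)

-- ===== LEMMAS AND PROOFS =====

-- the line at indentation level lvl
def pvIndLine (lvl : Int) (line : List Char) : List Char :=
  if PySem.Chars.strip line = [] then line else PySem.List.pyRepeat "    ".toList lvl ++ line

theorem pvRepSucc (k : Nat) (l : List Char) :
    PySem.List.pyRepeat "    ".toList ((k : Int) + 1) ++ l
      = "    ".toList ++ (PySem.List.pyRepeat "    ".toList k ++ l) := by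
  simp [PySem.List.pyRepeat, List.replicate_succ]

theorem pvStrip4 (l : List Char) :
    PySem.Chars.strip ("    ".toList ++ l) = PySem.Chars.strip l := by
  show PySem.Chars.strip (' '::' '::' '::' '::l) = PySem.Chars.strip l
  simp [PySem.Chars.strip, PySem.Chars.lstrip, PySem.Chars.isspace]

theorem pvStripRep (m : Nat) (l : List Char) :
    PySem.Chars.strip (PySem.List.pyRepeat "    ".toList (m : Int) ++ l) = PySem.Chars.strip l := by
  induction m with
  | zero => simp [PySem.List.pyRepeat]
  | succ m ih =>
    rw [show ((m + 1 : Nat) : Int) = (m : Int) + 1 by omega, pvRepSucc, pvStrip4, ih]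

-- one iteration of B's loop advances every line by one level
theorem pvStepMap (lines0 : List (List Char)) (m : Nat) :
    (lines0.map (pvIndLine (m : Int))).map
      (fun l => if PySem.Chars.strip l ≠ [] then "    ".toList ++ l else l)
    = lines0.map (pvIndLine ((m : Int) + 1)) := by
  rw [List.map_map]
  apply List.map_congr_left
  intro l _
  simp only [Function.comp_apply]
  unfold pvIndLine
  by_cases hb : PySem.Chars.strip l = []
  · simp [hb]
  · rw [if_neg hb, if_neg hb, if_pos (by rw [pvStripRep]; exact hb), pvRepSucc]

-- A's inner loop builds exactly the map of pvIndLine over the lines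
theorem pvInnerA (lines : List (List Char)) (lvl : Int) :
    lines.foldl
      (fun acc line =>
        if PySem.Chars.strip line ≠ [] then acc ++ [PySem.List.pyRepeat "    ".toList lvl ++ line]
        else acc ++ [line]) []
    = lines.map (pvIndLine lvl) := by
  have hfun : (fun (acc : List (List Char)) (line : List Char) =>
      if PySem.Chars.strip line ≠ [] then acc ++ [PySem.List.pyRepeat "    ".toList lvl ++ line]
      else acc ++ [line]) = (fun acc line => acc ++ [pvIndLine lvl line]) := by
    funext acc line
    unfold pvIndLine
    by_cases hb : PySem.Chars.strip line = [] <;> simp [hb]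
  rw [hfun]
  simpa using PySem.List.foldl_append_singleton_eq_map (pvIndLine lvl) lines []

-- B's loop invariant: after n iterations starting at level m
theorem pvLoopB (lines0 : List (List Char)) (n m : Nat) (V : List String) :
    (List.range n).foldl
      (fun (st : List (List Char) × List String) _ =>
        let nxt := st.1.map (fun l => if PySem.Chars.strip l ≠ [] then "    ".toList ++ l else l)
        (nxt, st.2 ++ [String.ofList (PySem.Chars.join ['\n'] nxt)]))
      (lines0.map (pvIndLine (m : Int)), V)
    = (lines0.map (pvIndLine (((m + n : Nat)) : Int)),
       V ++ (List.range n).map (fun j => String.ofList (PySem.Chars.join ['\n']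
          (lines0.map (pvIndLine (((m + j + 1 : Nat)) : Int)))))) := by
  induction n generalizing V with
  | zero => simp
  | succ n ih =>
    rw [List.range_succ, List.foldl_append, ih, List.foldl_cons, List.foldl_nil]
    simp only
    rw [show (((m + n : Nat)) : Int) = ((n + m : Nat) : Int) by omega]
    rw [pvStepMap lines0 (n + m)]
    refine Prod.ext ?_ ?_
    · simp only
      rw [show ((m + (n + 1) : Nat) : Int) = ((n + m : Nat) : Int) + 1 by omega]
    · simp only [List.map_append, List.map_cons, List.map_nil, List.append_assoc]
      rw [show ((m + n + 1 : Nat) : Int) = ((n + m : Nat) : Int) + 1 by omega]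

-- common closed form of both results
def pvResult (content : String) (max_indent : Int) : List String :=
  content :: (List.range max_indent.toNat).map
    (fun (k : Nat) => String.ofList (PySem.Chars.join ['\n']
      ((PySem.Chars.splitlines content.toList).map (pvIndLine ((k : Int) + 1)))))

theorem pvA_eq (content : String) (max_indent : Int) :
    try_different_indentations_py content max_indent = pvResult content max_indent := by
  unfold try_different_indentations_py pvResult
  simp only
  rw [PySem.List.pyRange_one, show max_indent + 1 - 1 = max_indent by ring, List.foldl_map]
  have hfun : (fun (vars : List String) (k : Nat) =>
      vars ++ [String.ofList (PySem.Chars.join ['\n']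
        ((PySem.Chars.splitlines content.toList).foldl
          (fun acc line =>
            if PySem.Chars.strip line ≠ [] then
              acc ++ [PySem.List.pyRepeat "    ".toList (1 + (k : Int)) ++ line]
            else acc ++ [line]) []))])
      = (fun (vars : List String) (k : Nat) => vars ++ [String.ofList (PySem.Chars.join ['\n']
          ((PySem.Chars.splitlines content.toList).map (pvIndLine ((k : Int) + 1))))]) := by
    funext vars k
    rw [pvInnerA, show (1 + (k : Int)) = (k : Int) + 1 by ring]
  rw [hfun, PySem.List.foldl_append_singleton_eq_map]
  simp

theorem pvB_eq (content : String) (max_indent : Int) :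
    try_different_indentations_py_alt content max_indent = pvResult content max_indent := by
  unfold try_different_indentations_py_alt pvResult
  simp only
  have h0 : PySem.Chars.splitlines content.toList
      = (PySem.Chars.splitlines content.toList).map (pvIndLine ((0 : Nat) : Int)) := by
    rw [List.map_congr_left (fun l _ => ?_), List.map_id]
    unfold pvIndLine
    simp [PySem.List.pyRepeat]
  have hl := pvLoopB (PySem.Chars.splitlines content.toList) max_indent.toNat 0 [content]
  rw [← h0] at hl
  rw [hl]
  simp

-- ===== VERDICT =====
theorem try_different_indentations_py_spec : Claim_equal_try_different_indentations_py := by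
  intro content max_indent _
  unfold Spec_try_different_indentations_py
  rw [pvA_eq, pvB_eq]
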